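-- pv_equiv track=rewrite | github.com/GustavoVieiraDeAraujo/ExerciciosEProjetos | Arquivos/Questão 9/Resposta 9.py | tresDivisoresPrimos
-- ===== SOURCE A (Python) =====
-- def tresDivisoresPrimos(listaDeDivisores):
--     contador_1 = 0
--     for divisor in listaDeDivisores:
--         if contador_1 == 3:
--             return True
--         if divisor > 1:
--             for i in range(2, divisor):
--                 if (divisor % i) == 0:
--                     break
--             else:
--                 contador_1 += 1
-- ===== SOURCE B (Python) =====
-- def _eh_primo(divisor):
--     if divisor < 2:
--         return False
--     i = 2
--     while i * i <= divisor:
--         if divisor % i == 0: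
--             return False
--         i += 1
--     return True
--
--
-- def tresDivisoresPrimos(listaDeDivisores):
--     if sum(1 for divisor in listaDeDivisores if _eh_primo(divisor)) >= 3:
--         return True
-- ===== Notes on version B (the rewrite author's own statement) =====
-- stated objective: alternative
-- what changed: B replaces A's stateful early-exit loop (counter + for/else trial division over all of range(2, divisor)) by a single counting comprehension whose primality test does trial division only up to sqrt(divisor); it trades A's early exit after the third prime for a full count of the list.
-- intended difference: On lists that contain at least three primes but whose third prime is the final element, A returns None (it only tests the counter before reading a further element) while B returns True, the intended value since the list does contain three primes. — e.g. on tresDivisoresPrimos([2, 3, 5]): A returns none, B returns some true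
import Mathlib
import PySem

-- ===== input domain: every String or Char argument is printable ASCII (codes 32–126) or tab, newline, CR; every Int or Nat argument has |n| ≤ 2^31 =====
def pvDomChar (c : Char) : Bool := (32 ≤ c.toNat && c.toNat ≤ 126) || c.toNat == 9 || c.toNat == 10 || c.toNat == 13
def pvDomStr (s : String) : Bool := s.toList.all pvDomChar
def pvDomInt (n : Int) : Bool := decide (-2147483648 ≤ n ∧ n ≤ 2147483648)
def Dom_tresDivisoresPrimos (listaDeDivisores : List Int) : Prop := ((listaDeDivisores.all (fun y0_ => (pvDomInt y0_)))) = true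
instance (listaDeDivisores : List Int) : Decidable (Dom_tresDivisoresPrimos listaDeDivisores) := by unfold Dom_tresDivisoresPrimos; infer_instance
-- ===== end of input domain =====

-- B counts the primes of the list in one comprehension, testing primality by trial division
-- up to sqrt(divisor), instead of A's stateful early-exit loop over range(2, divisor) (an
-- alternative decomposition, not claimed faster); on lists whose third prime is the last
-- element A returns None while B returns True (D_ below).


-- ===== PORT A =====
-- 'for i in range(2, divisor): if divisor % i == 0: break' / for-else: walks i = 2, 3, …
-- lazily as Python's range does, reporting whether the break fired; ported with a Nat fuel
-- of (divisor - 2).toNat iterations — exact, since i starts at 2 and grows by 1, so the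
-- guard i < divisor fails exactly when the fuel runs out
def pvABreakGo : Nat → Int → Int → Bool
  | 0, _, _ => false
  | fuel + 1, d, i =>
    if i < d then
      if PySem.Int.mod d i == 0 then true else pvABreakGo fuel d (i + 1)
    else false

def pvABreak (divisor : Int) : Bool := pvABreakGo (divisor - 2).toNat divisor 2

def pvALoop : List Int → Int → Option Bool
  | [], _ => none
  | divisor :: rest, contador_1 =>
    if contador_1 = 3 then some true
    else if divisor > 1 then
      if pvABreak divisor then pvALoop rest contador_1
      else pvALoop rest (contador_1 + 1)
    else pvALoop rest contador_1

def tresDivisoresPrimos (listaDeDivisores : List Int) : Option Bool :=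
  pvALoop listaDeDivisores 0

-- ===== PORT B =====
-- 'while i * i <= divisor: if divisor % i == 0: return False; i += 1' — ported with a Nat
-- fuel of divisor.toNat iterations; exact, since i grows by 1 from 2 so the guard
-- i * i ≤ divisor fails strictly before the fuel runs out
def pvBTrialGo : Nat → Int → Int → Bool
  | 0, _, _ => true
  | fuel + 1, d, i =>
    if i * i ≤ d then
      if PySem.Int.mod d i == 0 then false
      else pvBTrialGo fuel d (i + 1)
    else true

def pvEhPrimo (divisor : Int) : Bool :=
  if divisor < 2 then false else pvBTrialGo divisor.toNat divisor 2

-- 'sum(1 for divisor in listaDeDivisores if _eh_primo(divisor)) >= 3' as countP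
def tresDivisoresPrimos_alt (listaDeDivisores : List Int) : Option Bool :=
  if 3 ≤ (listaDeDivisores.countP pvEhPrimo : Int) then some true else none

-- ===== PRECONDITION & SPEC =====
-- On lists that contain at least three primes but whose third prime is the final element,
-- A returns None (it only tests its counter before reading a further element) while B returns
-- True — the intended value, since the list does contain three primes.
def D_tresDivisoresPrimos (listaDeDivisores : List Int) : Prop :=
  3 ≤ listaDeDivisores.countP (fun d => decide (Nat.Prime d.toNat)) ∧
  listaDeDivisores.dropLast.countP (fun d => decide (Nat.Prime d.toNat)) < 3
instance (listaDeDivisores : List Int) : Decidable (D_tresDivisoresPrimos listaDeDivisores) := by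
  unfold D_tresDivisoresPrimos; infer_instance

def Spec_tresDivisoresPrimos (listaDeDivisores : List Int) (out : Option Bool) : Prop :=
  ¬ D_tresDivisoresPrimos listaDeDivisores → out = tresDivisoresPrimos_alt listaDeDivisores
instance (listaDeDivisores : List Int) (out : Option Bool) : Decidable (Spec_tresDivisoresPrimos listaDeDivisores out) := by
  unfold Spec_tresDivisoresPrimos; infer_instance

def pvDiffWitness_tresDivisoresPrimos : List Int := [2, 3, 5]
def pvDiffWitnessOut_tresDivisoresPrimos : (Option Bool) × (Option Bool) := (none, some true)

-- ===== CLAIM (what is proved, stated in full; the proofs are below) =====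
def Claim_unchanged_tresDivisoresPrimos : Prop := ∀ (listaDeDivisores : List Int), Dom_tresDivisoresPrimos listaDeDivisores → Spec_tresDivisoresPrimos listaDeDivisores (tresDivisoresPrimos listaDeDivisores)
def Claim_changed_tresDivisoresPrimos : Prop := Dom_tresDivisoresPrimos (pvDiffWitness_tresDivisoresPrimos) ∧ D_tresDivisoresPrimos (pvDiffWitness_tresDivisoresPrimos) ∧ tresDivisoresPrimos (pvDiffWitness_tresDivisoresPrimos) = pvDiffWitnessOut_tresDivisoresPrimos.1 ∧ tresDivisoresPrimos_alt (pvDiffWitness_tresDivisoresPrimos) = pvDiffWitnessOut_tresDivisoresPrimos.2 ∧ pvDiffWitnessOut_tresDivisoresPrimos.1 ≠ pvDiffWitnessOut_tresDivisoresPrimos.2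
def Claim_exact_tresDivisoresPrimos : Prop := ∀ (listaDeDivisores : List Int), Dom_tresDivisoresPrimos listaDeDivisores → D_tresDivisoresPrimos listaDeDivisores → tresDivisoresPrimos listaDeDivisores ≠ tresDivisoresPrimos_alt listaDeDivisores

-- ===== LEMMAS AND PROOFS =====

-- B's fuelled trial loop: with enough fuel, true iff no j with i ≤ j and j*j ≤ d divides d
lemma pvBTrialGo_iff (d : Int) : ∀ (fuel : Nat) (i : Int), 1 ≤ i → d < i + fuel →
    (pvBTrialGo fuel d i = true ↔ ∀ j : Int, i ≤ j → j * j ≤ d → ¬ (j ∣ d)) := by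
  intro fuel
  induction fuel with
  | zero =>
    intro i h1 hf
    simp only [pvBTrialGo, true_iff]
    intro j hij hjj
    exfalso
    have : j ≤ j * j := by nlinarith
    omega
  | succ n ih =>
    intro i h1 hf
    show (if i * i ≤ d then
        if PySem.Int.mod d i == 0 then false else pvBTrialGo n d (i + 1)
      else true) = true ↔ _
    by_cases hg : i * i ≤ d
    · rw [if_pos hg]
      by_cases hm : PySem.Int.mod d i == 0
      · rw [if_pos hm]
        simp only [Bool.false_eq_true, false_iff]
        push Not
        exact ⟨i, le_refl i, hg, by rwa [← PySem.Int.mod_eq_zero_iff_dvd, ← beq_iff_eq]⟩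
      · rw [if_neg hm, ih (i + 1) (by omega) (by push_cast at hf ⊢; omega)]
        constructor
        · intro hall j hij hjj
          rcases eq_or_lt_of_le hij with rfl | hlt
          · rw [← PySem.Int.mod_eq_zero_iff_dvd]
            simpa using hm
          · exact hall j (by omega) hjj
        · intro hall j hij hjj
          exact hall j (by omega) hjj
    · rw [if_neg hg]
      simp only [true_iff]
      intro j hij hjj
      exfalso
      have : i * i ≤ j * j := by nlinarith
      omega

-- B's primality test decides Nat.Prime d.toNat
lemma pvEhPrimo_eq (d : Int) : pvEhPrimo d = decide (Nat.Prime d.toNat) := by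
  unfold pvEhPrimo
  by_cases hd : d < 2
  · have : d.toNat = 0 ∨ d.toNat = 1 := by omega
    rcases this with h | h <;> simp [hd, h, Nat.not_prime_zero, Nat.not_prime_one]
  · push Not at hd
    rw [if_neg (by omega)]
    have key : pvBTrialGo d.toNat d 2 = true ↔ Nat.Prime d.toNat := by
      rw [pvBTrialGo_iff d d.toNat 2 (by omega) (by omega)]
      have hdn : d = (d.toNat : Int) := by omega
      constructor
      · intro h
        rw [Nat.prime_def_le_sqrt]
        refine ⟨by omega, ?_⟩
        intro m hm hms hdvd
        have hmm : (m : Int) * m ≤ d := by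
          have h2 := Nat.le_sqrt.mp hms
          rw [hdn]; exact_mod_cast h2
        exact h (m : Int) (by exact_mod_cast hm) hmm (by rw [hdn]; exact_mod_cast hdvd)
      · intro hp j hj hjj hdvd
        have hjn : j = ((j.toNat : Nat) : Int) := by omega
        have hdvdn : j.toNat ∣ d.toNat := by
          rw [hdn] at hdvd; rw [hjn] at hdvd; exact_mod_cast hdvd
        have hjjn : j.toNat ≤ Nat.sqrt d.toNat := by
          rw [Nat.le_sqrt]
          have : (j.toNat : Int) * (j.toNat : Int) ≤ (d.toNat : Int) := by
            rw [← hjn, ← hdn]; exact hjj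
          exact_mod_cast this
        exact (Nat.prime_def_le_sqrt.mp hp).2 j.toNat (by omega) hjjn hdvdn
    cases h : decide (Nat.Prime d.toNat) with
    | true => exact key.mpr (of_decide_eq_true h)
    | false =>
      by_contra hne
      exact absurd (key.mp (by revert hne; cases pvBTrialGo d.toNat d 2 <;> simp)) (of_decide_eq_false h)

-- A's fuelled break-scan: with enough fuel, true iff some j with i ≤ j < d divides d
lemma pvABreakGo_iff (d : Int) : ∀ (fuel : Nat) (i : Int), d ≤ i + fuel →
    (pvABreakGo fuel d i = true ↔ ∃ j : Int, i ≤ j ∧ j < d ∧ j ∣ d) := by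
  intro fuel
  induction fuel with
  | zero =>
    intro i hf
    simp only [pvABreakGo, Bool.false_eq_true, false_iff]
    rintro ⟨j, hj1, hj2, _⟩
    omega
  | succ n ih =>
    intro i hf
    show (if i < d then
        if PySem.Int.mod d i == 0 then true else pvABreakGo n d (i + 1)
      else false) = true ↔ _
    by_cases hg : i < d
    · rw [if_pos hg]
      by_cases hm : PySem.Int.mod d i == 0
      · rw [if_pos hm]
        refine ⟨fun _ => ⟨i, le_refl i, hg, ?_⟩, fun _ => rfl⟩
        rw [← PySem.Int.mod_eq_zero_iff_dvd]
        simpa using hm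
      · rw [if_neg hm, ih (i + 1) (by push_cast at hf ⊢; omega)]
        constructor
        · rintro ⟨j, hj1, hj2, hj3⟩
          exact ⟨j, by omega, hj2, hj3⟩
        · rintro ⟨j, hj1, hj2, hj3⟩
          rcases eq_or_lt_of_le hj1 with heq | hlt
          · subst heq
            exact absurd ((PySem.Int.mod_eq_zero_iff_dvd d i).mpr hj3) (by simpa using hm)
          · exact ⟨j, by omega, hj2, hj3⟩
    · rw [if_neg hg]
      simp only [Bool.false_eq_true, false_iff]
      rintro ⟨j, hj1, hj2, _⟩
      omega

lemma pvABreak_iff (d : Int) :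
    (pvABreak d = true ↔ ∃ j : Int, 2 ≤ j ∧ j < d ∧ j ∣ d) := by
  unfold pvABreak
  exact pvABreakGo_iff d (d - 2).toNat 2 (by omega)

-- A's inner for/break agrees (negated) with B's test on divisor > 1
lemma pvABreak_eq (d : Int) (hd : 1 < d) : pvABreak d = !pvEhPrimo d := by
  rw [pvEhPrimo_eq]
  have key : pvABreak d = true ↔ ¬ Nat.Prime d.toNat := by
    rw [pvABreak_iff d]
    constructor
    · rintro ⟨i, hi2, hid, hdvd⟩ hp
      have hdvdn : i.toNat ∣ d.toNat := by
        have h1 : i = ((i.toNat : Nat) : Int) := by omega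
        have h2 : d = ((d.toNat : Nat) : Int) := by omega
        rw [h1, h2] at hdvd; exact_mod_cast hdvd
      exact (Nat.prime_def_lt'.mp hp).2 i.toNat (by omega) (by omega) hdvdn
    · intro hnp
      rw [Nat.prime_def_lt'] at hnp
      push Not at hnp
      rcases hnp (by omega) with ⟨m, hm2, hmlt, hdvd⟩
      refine ⟨(m : Int), by omega, by omega, ?_⟩
      have h2 : d = ((d.toNat : Nat) : Int) := by omega
      rw [h2]; exact_mod_cast hdvd
  cases h : decide (Nat.Prime d.toNat) with
  | true =>
    simp only [Bool.not_true]
    cases hx : pvABreak d with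
    | false => rfl
    | true => exact absurd (key.mp hx) (by simpa using of_decide_eq_true h)
  | false =>
    simp only [Bool.not_false]
    exact key.mpr (of_decide_eq_false h)

-- one step of A's loop, phrased through B's primality test
lemma pvALoop_step (x : Int) (tl : List Int) (c : Int) (hc : c ≤ 2) :
    pvALoop (x :: tl) c = pvALoop tl (if pvEhPrimo x then c + 1 else c) := by
  show (if c = 3 then some true
    else if x > 1 then
      if pvABreak x then pvALoop tl c else pvALoop tl (c + 1)
    else pvALoop tl c) = _
  rw [if_neg (by omega)]
  by_cases hx : 1 < x
  · rw [if_pos hx, pvABreak_eq x hx]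
    cases h : pvEhPrimo x with
    | true => simp
    | false => simp
  · have hpx : pvEhPrimo x = false := by unfold pvEhPrimo; rw [if_pos (by omega)]
    rw [if_neg hx, hpx]
    simp

-- A's loop in closed form: some true iff the counter reaches 3 before the last element
lemma A_char (xs : List Int) : ∀ (c : Int), c ≤ 2 →
    pvALoop xs c = if 3 ≤ c + (xs.dropLast.countP pvEhPrimo : Int) then some true else none := by
  induction xs with
  | nil =>
    intro c hc
    show (none : Option Bool) = _
    rw [if_neg (by simp; omega)]
  | cons x tl ih =>
    intro c hc
    rw [pvALoop_step x tl c hc]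
    cases tl with
    | nil =>
      have : pvALoop [] (if pvEhPrimo x then c + 1 else c) = none := by
        cases pvEhPrimo x <;> rfl
      rw [this, if_neg (by simp; omega)]
    | cons y rest =>
      rw [List.dropLast_cons₂, List.countP_cons]
      cases h : pvEhPrimo x with
      | false =>
        simp only [Bool.false_eq_true, if_false, Nat.add_zero]
        exact ih c hc
      | true =>
        simp only [if_true]
        by_cases h3 : c + 1 = 3
        · have hA : pvALoop (y :: rest) (c + 1) = some true := by
            rw [h3]
            show (if (3 : Int) = 3 then some true else _) = _
            rw [if_pos rfl]
          rw [hA, if_pos (by push_cast; omega)]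
        · rw [ih (c + 1) (by omega)]
          by_cases hx : 3 ≤ c + 1 + ((y :: rest).dropLast.countP pvEhPrimo : Int)
          · rw [if_pos hx, if_pos (by push_cast at hx ⊢; omega)]
          · rw [if_neg hx, if_neg (by push_cast at hx ⊢; omega)]

-- the two counting predicates coincide
lemma countP_eq (xs : List Int) :
    xs.countP pvEhPrimo = xs.countP (fun d => decide (Nat.Prime d.toNat)) := by
  have : pvEhPrimo = fun d => decide (Nat.Prime d.toNat) := funext pvEhPrimo_eq
  rw [this]

-- ===== VERDICT (by name: the statement is the Claim_ definition above) =====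
theorem tresDivisoresPrimos_spec : Claim_unchanged_tresDivisoresPrimos := by
  intro xs _ hD
  unfold D_tresDivisoresPrimos at hD
  push Not at hD
  show pvALoop xs 0 = tresDivisoresPrimos_alt xs
  rw [A_char xs 0 (by omega)]
  unfold tresDivisoresPrimos_alt
  rw [countP_eq, countP_eq]
  by_cases h : 3 ≤ xs.dropLast.countP (fun d => decide (Nat.Prime d.toNat))
  · have hxs : 3 ≤ xs.countP (fun d => decide (Nat.Prime d.toNat)) :=
      le_trans h ((List.dropLast_sublist xs).countP_le)
    rw [if_pos (by omega), if_pos (by omega)]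
  · have hxs : ¬ 3 ≤ xs.countP (fun d => decide (Nat.Prime d.toNat)) := by
      intro hc3
      exact h (by have := hD hc3; omega)
    rw [if_neg (by omega), if_neg (by omega)]

theorem tresDivisoresPrimos_changed : Claim_changed_tresDivisoresPrimos := by
  unfold Claim_changed_tresDivisoresPrimos
  refine ⟨by decide, by decide, ?_, ?_, by decide⟩
  · show pvALoop [2, 3, 5] 0 = none
    rw [A_char [2, 3, 5] 0 (by omega)]
    rw [show ([2, 3, 5] : List Int).dropLast = [2, 3] from rfl, countP_eq, if_neg (by decide)]
  · show tresDivisoresPrimos_alt [2, 3, 5] = some true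
    unfold tresDivisoresPrimos_alt
    rw [countP_eq, if_pos (by decide)]

theorem tresDivisoresPrimos_tight : Claim_exact_tresDivisoresPrimos := by
  intro xs _ hD
  obtain ⟨hD1, hD2⟩ := hD
  show pvALoop xs 0 ≠ tresDivisoresPrimos_alt xs
  unfold tresDivisoresPrimos_alt
  rw [A_char xs 0 (by omega), countP_eq, countP_eq, if_neg (by omega), if_pos (by omega)]
  simp
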